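-- pv_equiv track=rewrite | github.com/Bouscout/Recommender-System | my_anime_list_parser/preprocess.py | parse_boolean
-- ===== SOURCE A (Python) =====
-- def parse_boolean(raw_str, dico:dict):
--     copy_dico = dict(dico)
--     options = str(raw_str).split("|")
--
--     for cas in options :
--         if cas in copy_dico :
--             copy_dico[cas] = 1
--
--         elif "other" in copy_dico :
--             copy_dico["other"] = 1
--
--     return copy_dico
-- ===== SOURCE B (Python) =====
-- def parse_boolean(raw_str, dico: dict):
--     copy = dict(dico)
--     opts = set(str(raw_str).split("|"))
--     for key in copy:
--         if key in opts:
--             copy[key] = 1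
--     if "other" in copy and any(o not in dico for o in opts):
--         copy["other"] = 1
--     return copy
-- ===== Notes on version B (the rewrite author's own statement) =====
-- stated objective: alternative
-- what changed: Replaces A's option-driven if/elif loop (whose fallback rewrites copy['other'] once per unmatched option) with a key-driven single pass over the dict keys against a precomputed set of options, plus one separate existence check for the 'other' fallback.
import Mathlib
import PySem

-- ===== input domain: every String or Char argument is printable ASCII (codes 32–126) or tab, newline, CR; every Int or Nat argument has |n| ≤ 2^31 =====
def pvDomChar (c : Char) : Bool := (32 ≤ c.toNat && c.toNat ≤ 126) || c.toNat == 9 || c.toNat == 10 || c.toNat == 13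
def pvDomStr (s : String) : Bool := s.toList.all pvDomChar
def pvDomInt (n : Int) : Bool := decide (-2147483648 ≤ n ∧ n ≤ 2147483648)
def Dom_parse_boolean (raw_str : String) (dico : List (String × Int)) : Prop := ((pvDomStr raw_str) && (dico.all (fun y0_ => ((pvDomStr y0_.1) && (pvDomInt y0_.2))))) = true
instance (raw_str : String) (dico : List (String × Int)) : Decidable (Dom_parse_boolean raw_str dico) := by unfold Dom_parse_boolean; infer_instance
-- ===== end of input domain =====

-- B replaces A's option-driven if/elif loop with a key-driven pass over the dict plus one
-- separate existence check for the 'other' fallback (objective: alternative decomposition).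

-- ===== PORT A =====
-- for cas in options: if cas in copy_dico: copy_dico[cas] = 1 elif "other" in copy_dico: copy_dico["other"] = 1
def pvStepA (d : PySem.Dict String Int) (cas : String) : PySem.Dict String Int :=
  if d.contains cas then d.insert cas 1
  else if d.contains "other" then d.insert "other" 1
  else d

def parse_boolean (raw_str : String) (dico : List (String × Int)) : List (String × Int) :=
  let copy_dico := PySem.Dict.ofList dico
  let options := (PySem.Str.split? raw_str "|").getD []   -- sep "|" is nonempty, so split? is always `some`
  (options.foldl pvStepA copy_dico).items

-- ===== PORT B =====
-- for key in copy: if key in opts: copy[key] = 1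
def pvStepB (opts : PySem.Set String) (d : PySem.Dict String Int) (key : String) : PySem.Dict String Int :=
  if PySem.Set.contains opts key then d.insert key 1 else d

def parse_boolean_alt (raw_str : String) (dico : List (String × Int)) : List (String × Int) :=
  let d0 := PySem.Dict.ofList dico
  let opts : PySem.Set String := PySem.Set.ofList ((PySem.Str.split? raw_str "|").getD [])   -- sep "|" nonempty: always `some`
  let copy := d0.keys.foldl (pvStepB opts) d0
  let copy :=
    if copy.contains "other" && opts.any (fun o => !(d0.contains o)) then copy.insert "other" 1
    else copy
  copy.items

-- ===== PRECONDITION & SPEC =====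
def Spec_parse_boolean (raw_str : String) (dico : List (String × Int)) (out : List (String × Int)) : Prop := out = parse_boolean_alt raw_str dico
instance (raw_str : String) (dico : List (String × Int)) (out : List (String × Int)) : Decidable (Spec_parse_boolean raw_str dico out) := by unfold Spec_parse_boolean; infer_instance

-- ===== CLAIM (what is proved, stated in full; the proofs are below) =====
def Claim_equal_parse_boolean : Prop := ∀ (raw_str : String) (dico : List (String × Int)), Dom_parse_boolean raw_str dico → Spec_parse_boolean raw_str dico (parse_boolean raw_str dico)

-- ===== LEMMAS AND PROOFS =====

-- the flag A's fold ends up setting at key k, as a Bool over the option list and the key list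
def pvCondA (opts keys : List String) (k : String) : Bool :=
  opts.contains k || (k == "other" && opts.any (fun o => !(keys.contains o)))

theorem pv_mem_keys_of_mem_items {d : PySem.Dict String Int} {p : String × Int}
    (hp : p ∈ d.items) : p.1 ∈ d.keys := by
  simp only [PySem.Dict.keys]; exact List.mem_map_of_mem hp

-- normal form of A's loop, for an arbitrary starting dict
theorem pv_foldA (opts : List String) (d : PySem.Dict String Int) :
    (opts.foldl pvStepA d).items
      = d.items.map (fun p => if pvCondA opts d.keys p.1 then (p.1, (1:Int)) else p) := by
  induction opts generalizing d with
  | nil => simp [pvCondA]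
  | cons cas rest ih =>
    simp only [List.foldl_cons]
    by_cases hc : d.contains cas = true
    · have hck : cas ∈ d.keys := (PySem.Dict.contains_iff_mem_keys d cas).mp hc
      have hstep : pvStepA d cas = d.insert cas 1 := by simp [pvStepA, hc]
      rw [hstep, ih, PySem.Dict.keys_insert_of_contains d 1 hc,
        PySem.Dict.items_insert_of_contains d 1 hc, List.map_map]
      refine List.map_congr_left (fun p hp => ?_)
      have hpk : p.1 ∈ d.keys := pv_mem_keys_of_mem_items hp
      by_cases hpe : p.1 = cas
      · subst hpe
        simp [pvCondA, Function.comp]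
      · simp only [Function.comp, beq_iff_eq, hpe, pvCondA,
          List.contains_cons, List.any_cons]
        simp [hpe, hck]
    · by_cases ho : d.contains "other" = true
      · have hok : ("other" : String) ∈ d.keys := (PySem.Dict.contains_iff_mem_keys d _).mp ho
        have hck : cas ∉ d.keys := fun h => hc ((PySem.Dict.contains_iff_mem_keys d cas).mpr h)
        have hstep : pvStepA d cas = d.insert "other" 1 := by simp [pvStepA, hc, ho]
        rw [hstep, ih, PySem.Dict.keys_insert_of_contains d 1 ho,
          PySem.Dict.items_insert_of_contains d 1 ho, List.map_map]
        refine List.map_congr_left (fun p hp => ?_)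
        have hpk : p.1 ∈ d.keys := pv_mem_keys_of_mem_items hp
        have hpc : p.1 ≠ cas := fun h => hck (h ▸ hpk)
        have hkc : (d.keys.contains cas) = false := by simpa using hck
        by_cases hpe : p.1 = "other"
        · simp only [pvCondA, Function.comp, hpe, beq_iff_eq, List.contains_cons, List.any_cons]
          simp [hck]
        · simp [pvCondA, Function.comp, hpe, hpc]
      · have hck : cas ∉ d.keys := fun h => hc ((PySem.Dict.contains_iff_mem_keys d cas).mpr h)
        have hok : ("other" : String) ∉ d.keys := fun h => ho ((PySem.Dict.contains_iff_mem_keys d _).mpr h)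
        have hstep : pvStepA d cas = d := by simp [pvStepA, hc, ho]
        rw [hstep, ih]
        refine List.map_congr_left (fun p hp => ?_)
        have hpk : p.1 ∈ d.keys := pv_mem_keys_of_mem_items hp
        have hpc : p.1 ≠ cas := fun h => hck (h ▸ hpk)
        have hpo : p.1 ≠ "other" := fun h => hok (h ▸ hpk)
        have hkc : (d.keys.contains cas) = false := by simpa using hck
        simp [pvCondA, hpc, hpo]

-- normal form of B's first pass, for keys contained in the dict
theorem pv_foldB (opts : PySem.Set String) (ks : List String) (d : PySem.Dict String Int)
    (hks : ∀ k ∈ ks, k ∈ d.keys) :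
    (ks.foldl (pvStepB opts) d).items
      = d.items.map (fun p => if ks.contains p.1 && PySem.Set.contains opts p.1 then (p.1, (1:Int)) else p) := by
  induction ks generalizing d with
  | nil => simp
  | cons k rest ih =>
    simp only [List.foldl_cons]
    have hk : k ∈ d.keys := hks k (by simp)
    have hc : d.contains k = true := (PySem.Dict.contains_iff_mem_keys d k).mpr hk
    by_cases hS : PySem.Set.contains opts k = true
    · have hSm : k ∈ opts := (PySem.Set.contains_iff opts k).mp hS
      have hstep : pvStepB opts d k = d.insert k 1 := by unfold pvStepB; rw [if_pos hS]
      have hsub : ∀ x ∈ rest, x ∈ (d.insert k 1).keys := by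
        intro x hx
        rw [PySem.Dict.keys_insert_of_contains d 1 hc]
        exact hks x (by simp [hx])
      rw [hstep, ih _ hsub, PySem.Dict.items_insert_of_contains d 1 hc, List.map_map]
      refine List.map_congr_left (fun p hp => ?_)
      by_cases hpe : p.1 = k
      · subst hpe; simp [Function.comp, hSm]
      · simp [Function.comp, hpe]
    · have hSm : k ∉ opts := fun h => hS ((PySem.Set.contains_iff opts k).mpr h)
      have hstep : pvStepB opts d k = d := by unfold pvStepB; rw [if_neg hS]
      rw [hstep, ih _ (fun x hx => hks x (by simp [hx]))]
      refine List.map_congr_left (fun p hp => ?_)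
      by_cases hpe : p.1 = k
      · subst hpe; simp [hSm]
      · simp [hpe]

-- membership bridges between B's set of options / dict-contains and A's raw lists
theorem pv_any_eq (L : List String) (d0 : PySem.Dict String Int) :
    (L.any fun o => !(d0.keys.contains o)) = ((PySem.Set.ofList L).any fun o => !(d0.contains o)) := by
  rw [Bool.eq_iff_iff]
  simp only [List.any_eq_true, Bool.not_eq_true']
  constructor
  · rintro ⟨o, hoL, ho⟩
    refine ⟨o, (PySem.Set.mem_ofList L o).mpr hoL, ?_⟩
    rw [Bool.eq_false_iff, Ne, PySem.Dict.contains_iff_mem_keys]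
    intro hm
    rw [Bool.eq_false_iff, Ne] at ho
    exact ho (by simpa using hm)
  · rintro ⟨o, hoS, ho⟩
    refine ⟨o, (PySem.Set.mem_ofList L o).mp hoS, ?_⟩
    rw [Bool.eq_false_iff, Ne] at ho ⊢
    intro hm
    exact ho ((PySem.Dict.contains_iff_mem_keys d0 o).mpr (by simpa using hm))

-- ===== VERDICT (by name: the statement is the Claim_ definition above) =====
theorem parse_boolean_spec : Claim_equal_parse_boolean := by
  intro raw_str dico _
  unfold Spec_parse_boolean parse_boolean parse_boolean_alt
  simp only []
  set L := (PySem.Str.split? raw_str "|").getD [] with hL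
  set d0 := PySem.Dict.ofList dico with hd0
  set S : PySem.Set String := PySem.Set.ofList L with hSdef
  have hcopy := pv_foldB S d0.keys d0 (fun k hk => hk)
  set copy := d0.keys.foldl (pvStepB S) d0 with hcpy
  have hkeys : copy.keys = d0.keys := by
    show copy.items.map (·.1) = d0.items.map (·.1)
    rw [hcopy, List.map_map]
    refine List.map_congr_left (fun p hp => ?_)
    simp only [Function.comp]
    split <;> simp
  have hcont : copy.contains "other" = d0.contains "other" := by
    rw [PySem.Dict.contains_eq_decide_mem_keys, PySem.Dict.contains_eq_decide_mem_keys, hkeys]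
  rw [pv_foldA]
  by_cases hF : (copy.contains "other" && S.any fun o => !(d0.contains o)) = true
  · rw [if_pos hF]
    have hco : copy.contains "other" = true := by
      cases hq : copy.contains "other" with
      | true => rfl
      | false => rw [hq] at hF; simp at hF
    have hsany : (S.any fun o => !(d0.contains o)) = true := by
      cases hq : (S.any fun o => !(d0.contains o)) with
      | true => rfl
      | false => rw [hq] at hF; simp at hF
    have hany : (L.any fun o => !(d0.keys.contains o)) = true := by
      rw [pv_any_eq L d0]; exact hsany
    have hex : ∃ x ∈ L, x ∉ d0.keys := by simpa using hany
    rw [PySem.Dict.items_insert_of_contains copy 1 hco, hcopy, List.map_map]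
    refine List.map_congr_left (fun p hp => ?_)
    have hpk : p.1 ∈ d0.keys := pv_mem_keys_of_mem_items hp
    by_cases hpe : p.1 = "other" <;> by_cases hin : p.1 ∈ S
    · have hpk' : ("other" : String) ∈ d0.keys := hpe ▸ hpk
      have hin' : ("other" : String) ∈ S := hpe ▸ hin
      simp [Function.comp, pvCondA, hpe, hex, hpk', hin']
    · have hpk' : ("other" : String) ∈ d0.keys := hpe ▸ hpk
      have hin' : ("other" : String) ∉ S := hpe ▸ hin
      simp [Function.comp, pvCondA, hpe, hex, hpk', hin']
    · have hLc : p.1 ∈ L := (PySem.Set.mem_ofList L p.1).mp hin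
      simp [Function.comp, pvCondA, hpe, hpk, hin, hLc]
    · have hLc : p.1 ∉ L := fun h => hin ((PySem.Set.mem_ofList L p.1).mpr h)
      simp [Function.comp, pvCondA, hpe, hpk, hin, hLc]
  · rw [if_neg hF, hcopy]
    refine List.map_congr_left (fun p hp => ?_)
    have hpk : p.1 ∈ d0.keys := pv_mem_keys_of_mem_items hp
    have hnoex : p.1 = "other" → ¬ ∃ x ∈ L, x ∉ d0.keys := by
      intro hpe
      have hco : copy.contains "other" = true := by
        rw [hcont, PySem.Dict.contains_iff_mem_keys]; exact hpe ▸ hpk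
      have hsany : (S.any fun o => !(d0.contains o)) = false := by
        cases hq : (S.any fun o => !(d0.contains o)) with
        | false => rfl
        | true => exact absurd (by simp [hco, hq]) hF
      have := pv_any_eq L d0
      rw [hsany] at this
      simpa using this
    by_cases hpe : p.1 = "other" <;> by_cases hin : p.1 ∈ S
    · have hLc : ("other" : String) ∈ L := hpe ▸ (PySem.Set.mem_ofList L p.1).mp hin
      have hpk' : ("other" : String) ∈ d0.keys := hpe ▸ hpk
      have hin' : ("other" : String) ∈ S := hpe ▸ hin
      simp [pvCondA, hpe, hpk', hin', hLc]
    · have hLc : ("other" : String) ∉ L := hpe ▸ fun h => hin ((PySem.Set.mem_ofList L p.1).mpr h)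
      have hpk' : ("other" : String) ∈ d0.keys := hpe ▸ hpk
      have hin' : ("other" : String) ∉ S := hpe ▸ hin
      simp [pvCondA, hpe, hpk', hin', hLc, hnoex hpe]
    · have hLc : p.1 ∈ L := (PySem.Set.mem_ofList L p.1).mp hin
      simp [pvCondA, hpk, hin, hLc]
    · have hLc : p.1 ∉ L := fun h => hin ((PySem.Set.mem_ofList L p.1).mpr h)
      simp [pvCondA, hpe, hpk, hin, hLc]
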